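-- pv_equiv track=rewrite | github.com/bdaene/advent-of-code-2024 | advent_of_code_2024/day_24.py | sort_gates
-- ===== SOURCE A (Python) =====
-- def sort_gates(gates):
--     wires = {c: {a, b} for c, (op, a, b) in gates.items()}
--
--     available_wires = {i for inputs in wires.values() for i in inputs if i not in wires}
--     sorted_wires = []
--     while wires:
--         new_available_wires = {c for c, inputs in wires.items() if not (inputs - available_wires)}
--         sorted_wires += sorted(new_available_wires)
--         available_wires |= new_available_wires
--         for c in new_available_wires:
--             del wires[c]
--
--     return [(wire, gates[wire]) for wire in sorted_wires]
-- ===== SOURCE B (Python) =====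
-- def sort_gates(gates):
--     # Kahn-style level-by-level topological sort: reverse adjacency + remaining-input
--     # counters instead of rescanning every remaining gate each round.
--     indeg = {}
--     deps = {}
--     for c, (op, a, b) in gates.items():
--         ins = [a] + ([b] if b != a else [])
--         ins = [w for w in ins if w in gates]
--         indeg[c] = len(ins)
--         for w in ins:
--             deps.setdefault(w, []).append(c)
--     level = sorted(c for c in indeg if indeg[c] == 0)
--     result = []
--     while level:
--         result += level
--         next_level = []
--         for w in level:
--             for c in deps.get(w, []):
--                 indeg[c] -= 1
--                 if indeg[c] == 0:
--                     next_level.append(c)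
--         level = sorted(next_level)
--     return [(c, gates[c]) for c in result]
-- ===== Notes on version B (the rewrite author's own statement) =====
-- stated objective: faster
-- what changed: A rescans every remaining gate in every round (quadratic); B runs a Kahn-style level BFS with a reverse-adjacency map and remaining-input counters built once, so each round only touches gates adjacent to the wires just emitted, sorting each level.
import Mathlib
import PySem

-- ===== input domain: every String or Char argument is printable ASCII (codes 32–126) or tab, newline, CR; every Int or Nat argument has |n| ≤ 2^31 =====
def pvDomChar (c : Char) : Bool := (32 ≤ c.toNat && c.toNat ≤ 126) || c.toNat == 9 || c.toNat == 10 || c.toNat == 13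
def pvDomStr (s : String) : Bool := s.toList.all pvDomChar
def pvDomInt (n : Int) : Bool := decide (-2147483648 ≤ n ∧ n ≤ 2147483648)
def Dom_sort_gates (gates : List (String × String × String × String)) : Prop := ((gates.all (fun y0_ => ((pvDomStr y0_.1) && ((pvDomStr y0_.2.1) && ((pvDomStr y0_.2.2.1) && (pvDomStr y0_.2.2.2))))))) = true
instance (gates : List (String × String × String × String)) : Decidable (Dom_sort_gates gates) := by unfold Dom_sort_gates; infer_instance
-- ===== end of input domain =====

-- B replaces A's per-round rescan of every remaining gate by a Kahn-style level BFS
-- (reverse-adjacency map + remaining-input counters built once), sorting each level (objective: faster).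

-- ===== PORT A =====
-- the while loop of A, fuel-bounded: Python's loop never terminates on a cyclic
-- dependency graph (there the port returns the acyclic part, as B does); on every input where Python returns, the
-- fuel below is enough and the loop exits through its own empty test
def pvALoop (fuel : Nat) (wires : PySem.Dict String (PySem.Set String))
    (avail : PySem.Set String) (acc : List String) : List String :=
  match fuel with
  | 0 => acc
  | fuel + 1 =>
    if wires.items.isEmpty then acc
    else
      -- new_available_wires = {c for c, inputs in wires.items() if not (inputs - available_wires)}
      let newav : PySem.Set String :=
        PySem.Set.ofList ((wires.items.filter
          (fun p => (PySem.Set.diff p.2 avail).isEmpty)).map (fun p => p.1))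
      -- sorted_wires += sorted(new_available_wires)
      let acc := acc ++ PySem.List.sorted newav (fun x => x) false
      -- available_wires |= new_available_wires
      let avail := PySem.Set.union avail newav
      -- for c in new_available_wires: del wires[c]
      let wires := newav.foldl (fun w c => w.erase c) wires
      pvALoop fuel wires avail acc

def sort_gates (gates : List (String × String × String × String)) :
    List (String × (String × String × String)) :=
  let d : PySem.Dict String (String × String × String) := PySem.Dict.ofList gates
  -- wires = {c: {a, b} for c, (op, a, b) in gates.items()}
  let wires : PySem.Dict String (PySem.Set String) :=
    PySem.Dict.ofList (d.items.map (fun p => (p.1, PySem.Set.ofList [p.2.2.1, p.2.2.2])))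
  -- available_wires = {i for inputs in wires.values() for i in inputs if i not in wires}
  let avail : PySem.Set String :=
    PySem.Set.ofList ((wires.values.flatMap (fun s => s)).filter (fun i => !(wires.contains i)))
  let sortedWires := pvALoop (d.items.length + 1) wires avail []
  -- [(wire, gates[wire]) for wire in sorted_wires]  (every emitted wire is a key of d)
  sortedWires.map (fun w => (w, d.getD w ("", "", "")))

-- ===== PORT B =====
-- ins = [a] + ([b] if b != a else []); ins = [w for w in ins if w in gates]
def pvInsB (d : PySem.Dict String (String × String × String))
    (p : String × (String × String × String)) : List String :=
  ([p.2.2.1] ++ if p.2.2.2 ≠ p.2.2.1 then [p.2.2.2] else []).filter (fun w => d.contains w)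

-- indeg[c] = len(ins)
def pvBIndStep (d : PySem.Dict String (String × String × String))
    (ind : PySem.Dict String Int) (p : String × (String × String × String)) :
    PySem.Dict String Int :=
  ind.insert p.1 ((pvInsB d p).length : Int)

-- for w in ins: deps.setdefault(w, []).append(c)   (in-place append = Dict.modify)
def pvBDepsStep (d : PySem.Dict String (String × String × String))
    (dp : PySem.Dict String (List String)) (p : String × (String × String × String)) :
    PySem.Dict String (List String) :=
  (pvInsB d p).foldl (fun dp w => dp.modify w [] (fun l => l ++ [p.1])) dp

-- indeg[c] -= 1; if indeg[c] == 0: next_level.append(c)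
def pvBDec (st : PySem.Dict String Int × List String) (c : String) :
    PySem.Dict String Int × List String :=
  let ind := st.1.modify c 0 (fun n => n - 1)
  (ind, if ind.getD c 0 == 0 then st.2 ++ [c] else st.2)

-- the while loop of B, fuel-bounded (each round with a nonempty level emits at
-- least one gate, so the fuel is enough for the loop to exit through its own test)
def pvBLoop (fuel : Nat) (ind : PySem.Dict String Int)
    (deps : PySem.Dict String (List String)) (level res : List String) : List String :=
  match fuel with
  | 0 => res
  | fuel + 1 =>
    if level.isEmpty then res
    else
      let res := res ++ level
      let st := level.foldl
        (fun st w => (deps.getD w []).foldl pvBDec st) (ind, ([] : List String))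
      pvBLoop fuel st.1 deps (PySem.List.sorted st.2 (fun x => x) false) res

def sort_gates_alt (gates : List (String × String × String × String)) :
    List (String × (String × String × String)) :=
  let d : PySem.Dict String (String × String × String) := PySem.Dict.ofList gates
  -- one pass over gates.items() building indeg and deps
  let init := d.items.foldl
    (fun (st : PySem.Dict String Int × PySem.Dict String (List String)) p =>
      (pvBIndStep d st.1 p, pvBDepsStep d st.2 p))
    (PySem.Dict.empty, PySem.Dict.empty)
  let ind := init.1
  let deps := init.2
  -- level = sorted(c for c in indeg if indeg[c] == 0)
  let level := PySem.List.sorted (ind.keys.filter (fun c => ind.getD c 0 == 0)) (fun x => x) false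
  let result := pvBLoop (d.items.length + 1) ind deps level []
  result.map (fun c => (c, d.getD c ("", "", "")))

-- ===== PRECONDITION & SPEC =====
-- (no Pre_: the two ports agree on every input; on cyclic gate graphs Python A
--  itself never returns, which the differential test reports separately)
def Spec_sort_gates (gates : List (String × String × String × String))
    (out : List (String × (String × String × String))) : Prop := out = sort_gates_alt gates
instance (gates : List (String × String × String × String))
    (out : List (String × (String × String × String))) : Decidable (Spec_sort_gates gates out) := by
  unfold Spec_sort_gates; infer_instance

-- ===== CLAIM (what is proved, stated in full; the proofs are below) =====
def Claim_equal_sort_gates : Prop := ∀ (gates : List (String × String × String × String)), Dom_sort_gates gates → Spec_sort_gates gates (sort_gates gates)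

-- ===== LEMMAS AND PROOFS =====

-- gate-input wires of gate c that are themselves gate outputs
def pvGateIns (d : PySem.Dict String (String × String × String)) (c : String) : List String :=
  match d.get? c with
  | some v => ([v.2.1] ++ if v.2.2 ≠ v.2.1 then [v.2.2] else []).filter (fun w => d.contains w)
  | none => []

-- small general lemmas
theorem pvCountP_split (l : List String) (p q : String → Bool) :
    l.countP p = l.countP (fun x => p x && q x) + l.countP (fun x => p x && !q x) := by
  induction l with
  | nil => rfl
  | cons a t ih => by_cases h : p a <;> by_cases h2 : q a <;>
      simp [List.countP_cons, h, h2, ih] <;> omega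

theorem pvCount_nodup (l : List String) (h : l.Nodup) (c : String) :
    l.count c = if c ∈ l then 1 else 0 := by
  split
  · exact List.count_eq_one_of_mem h (by assumption)
  · exact List.count_eq_zero_of_not_mem (by assumption)

theorem pvInterLen (l1 l2 : List String) (h1 : l1.Nodup) (h2 : l2.Nodup) :
    (l1.filter (fun x => decide (x ∈ l2))).length = (l2.filter (fun x => decide (x ∈ l1))).length := by
  have e : ∀ (a b : List String), a.Nodup →
      (a.filter (fun x => decide (x ∈ b))).length = (a.toFinset ∩ b.toFinset).card := by
    intro a b ha
    rw [← List.toFinset_card_of_nodup (ha.filter _), List.toFinset_filter]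
    congr 1
    rw [← Finset.filter_mem_eq_inter]
    apply Finset.filter_congr; intro x hx; simp
  rw [e l1 l2 h1, e l2 l1 h2, Finset.inter_comm]

theorem pvSortedCongr (l1 l2 : List String) (h1 : l1.Nodup) (h2 : l2.Nodup)
    (h : ∀ x, x ∈ l1 ↔ x ∈ l2) :
    PySem.List.sorted l1 (fun x => x) false = PySem.List.sorted l2 (fun x => x) false := by
  have hp : (PySem.List.sorted l2 (fun x => x) false).Perm l1 :=
    (PySem.List.sorted_perm l2 _ false).trans
      ((List.perm_ext_iff_of_nodup h2 h1).2 (fun a => (h a).symm))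
  have hpl : List.Pairwise (fun a b : String => a < b) (PySem.List.sorted l2 (fun x => x) false) := by
    have hle := PySem.List.sorted_pairwise l2 (fun x => x)
    have hnd : (PySem.List.sorted l2 (fun x => x) false).Nodup :=
      ((PySem.List.sorted_perm l2 _ false).nodup_iff).2 h2
    exact (hle.and hnd).imp (fun {a b} hab => lt_of_le_of_ne hab.1 hab.2)
  exact PySem.List.sorted_eq_of_perm_of_pairwise_lt l1 _ _ hp hpl

theorem pvFlatMapIf (l : List (String × (String × String × String))) (q : _ → Bool) (f : _ → String) :
    l.flatMap (fun p => if q p then [f p] else []) = (l.filter q).map f := by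
  induction l with
  | nil => rfl
  | cons a t ih => by_cases h : q a <;> simp [List.flatMap_cons, h, ih]

theorem pvEraseFold (l : List String) (W : PySem.Dict String (PySem.Set String)) :
    (l.foldl (fun w c => w.erase c) W).items
      = W.items.filter (fun p => !decide (p.1 ∈ l)) := by
  induction l generalizing W with
  | nil => simp
  | cons c cs ih =>
    rw [List.foldl_cons, ih]
    show (W.erase c).items.filter _ = _
    simp only [PySem.Dict.erase, List.filter_filter]
    apply List.filter_congr
    intro p _
    by_cases h1 : p.1 = c <;> by_cases h2 : p.1 ∈ cs <;> simp [h1, h2]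

theorem pvAStall (f : Nat) (W : PySem.Dict String (PySem.Set String))
    (avail : PySem.Set String) (acc : List String)
    (h : W.items.filter (fun p => (PySem.Set.diff p.2 avail).isEmpty) = []) :
    pvALoop f W avail acc = acc := by
  induction f with
  | zero => rfl
  | succ f ih =>
    rw [pvALoop]
    split
    · rfl
    · simp only [h, List.map_nil]
      have e1 : PySem.List.sorted (PySem.Set.ofList ([] : List String)) (fun x => x) false = [] := rfl
      have e2 : List.foldl (fun (w : PySem.Dict String (PySem.Set String)) c => w.erase c) W
          (PySem.Set.ofList ([] : List String)) = W := rfl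
      have e3 : PySem.Set.union avail (PySem.Set.ofList ([] : List String)) = avail := rfl
      rw [e1, e2, e3, List.append_nil]
      exact ih

theorem pvDecFold (cs : List String) (ind : PySem.Dict String Int) (nl : List String)
    (hge : ∀ c ∈ cs, (cs.count c : Int) ≤ ind.getD c 0) :
    (∀ v, (cs.foldl pvBDec (ind, nl)).1.getD v 0 = ind.getD v 0 - cs.count v) ∧
    (∀ c, c ∈ (cs.foldl pvBDec (ind, nl)).2 ↔
      (c ∈ nl ∨ (c ∈ cs ∧ ind.getD c 0 = cs.count c))) ∧
    (nl.Nodup → (∀ c ∈ cs, ind.getD c 0 = cs.count c → c ∉ nl) →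
      (cs.foldl pvBDec (ind, nl)).2.Nodup) := by
  induction cs generalizing ind nl with
  | nil =>
    refine ⟨fun v => by simp, fun c => by simp, fun h _ => h⟩
  | cons a cs ih =>
    have hcnt_cons : ∀ (x : String), ((a :: cs).count x : Int)
        = cs.count x + (if x = a then 1 else 0) := by
      intro x; by_cases h : x = a
      · subst h; simp [List.count_cons_self]
      · have h' : a ≠ x := fun hh => h hh.symm
        simp [List.count_cons, h, h']
    set ind' := ind.modify a 0 (fun n => n - 1) with hind'
    have hgetD : ∀ v, ind'.getD v 0 = if v = a then ind.getD a 0 - 1 else ind.getD v 0 := by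
      intro v; rw [hind', PySem.Dict.getD_modify]
    have hva : ind'.getD a 0 = ind.getD a 0 - 1 := by rw [hgetD a, if_pos rfl]
    have hgea : (cs.count a : Int) + 1 ≤ ind.getD a 0 := by
      have := hge a (by simp); rw [hcnt_cons a, if_pos rfl] at this; omega
    set nl' := if ind'.getD a 0 == 0 then nl ++ [a] else nl with hnl'
    have hstep : (a :: cs).foldl pvBDec (ind, nl) = cs.foldl pvBDec (ind', nl') := rfl
    have hge' : ∀ c ∈ cs, (cs.count c : Int) ≤ ind'.getD c 0 := by
      intro c hc
      have := hge c (by simp [hc])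
      rw [hcnt_cons c] at this
      rw [hgetD c]
      by_cases h : c = a <;> simp [h] at this ⊢ <;> omega
    obtain ⟨ih1, ih2, ih3⟩ := ih ind' nl' hge'
    rw [hstep]
    refine ⟨?_, ?_, ?_⟩
    · intro v
      rw [ih1 v, hgetD v, hcnt_cons v]
      by_cases h : v = a <;> simp [h] <;> omega
    · intro c
      rw [ih2 c]
      by_cases hc : c = a
      · subst hc
        by_cases hz : ind.getD c 0 = 1
        · -- branch taken: indeg hits 0, c is appended to next_level
          have hk0 : cs.count c = 0 := by omega
          have hnotcs : c ∉ cs := by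
            intro hmem
            have : 0 < cs.count c := List.count_pos_iff.2 hmem
            omega
          have hnl'' : nl' = nl ++ [c] := by rw [hnl', if_pos (by simp [hva, hz])]
          rw [hnl'']
          have hcint : ((c :: cs).count c : Int) = 1 := by
            rw [hcnt_cons c, if_pos rfl, hk0]; norm_num
          constructor
          · intro _
            exact Or.inr ⟨by simp, by rw [hz, hcint]⟩
          · intro _
            exact Or.inl (by simp)
        · have hnl'' : nl' = nl := by rw [hnl', if_neg (by simp [hva]; omega)]
          rw [hnl'']
          constructor
          · rintro (h | ⟨hmem, heq⟩)
            · left; exact h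
            · right
              refine ⟨by simp [hmem], ?_⟩
              rw [hva] at heq
              rw [hcnt_cons c, if_pos rfl]
              omega
          · rintro (h | ⟨_, heq⟩)
            · left; exact h
            · rw [hcnt_cons c, if_pos rfl] at heq
              by_cases hmem : c ∈ cs
              · right
                refine ⟨hmem, ?_⟩
                rw [hva]
                omega
              · exfalso
                have : cs.count c = 0 := List.count_eq_zero_of_not_mem hmem
                omega
      · -- c ≠ a
        have hnlmem : c ∈ nl' ↔ c ∈ nl := by
          rw [hnl']; split <;> simp [hc]
        have hcount : ((a :: cs).count c : Int) = cs.count c := by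
          rw [hcnt_cons c, if_neg hc]; omega
        have hcount' : (a :: cs).count c = cs.count c := by exact_mod_cast hcount
        rw [hnlmem, hgetD c, if_neg hc, hcount']
        constructor
        · rintro (h | ⟨hmem, heq⟩)
          · left; exact h
          · right; exact ⟨by simp [hmem], heq⟩
        · rintro (h | ⟨hmem, heq⟩)
          · left; exact h
          · right
            refine ⟨?_, heq⟩
            rcases List.mem_cons.1 hmem with h | h
            · exact absurd h hc
            · exact h
    · intro hnd hfresh
      apply ih3
      · rw [hnl']
        split
        · rename_i hz
          have hz' : ind.getD a 0 = 1 := by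
            have : ind'.getD a 0 = 0 := by simpa using hz
            omega
          have hk0 : cs.count a = 0 := by omega
          apply List.Nodup.append hnd (by simp)
          intro x hx hx2
          simp only [List.mem_singleton] at hx2; subst hx2
          refine hfresh x (by simp) ?_ hx
          rw [hcnt_cons x, if_pos rfl, hz', hk0]; norm_num
        · exact hnd
      · intro c hc heq
        rw [hgetD c] at heq
        by_cases hca' : c = a
        · subst hca'
          rw [if_pos rfl] at heq
          have hc2 : ind.getD c 0 = ((c :: cs).count c : Int) := by
            rw [hcnt_cons c, if_pos rfl]; omega
          have hnotnl := hfresh c (by simp) hc2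
          rw [hnl']
          split
          · rename_i hz
            exfalso
            have h1 : ind'.getD c 0 = 0 := by simpa using hz
            have hpos : 0 < cs.count c := List.count_pos_iff.2 hc
            omega
          · exact hnotnl
        · rw [if_neg hca'] at heq
          have hcount : ((a :: cs).count c : Int) = cs.count c := by
            rw [hcnt_cons c, if_neg hca']; omega
          have := hfresh c (by simp [hc]) (by rw [hcount]; exact heq)
          rw [hnl']
          split
          · simp [hca', this]
          · exact this

-- membership in the raw two-element input list
theorem pvMemRaw (a b w : String) :
    w ∈ ([a] ++ if b ≠ a then [b] else []) ↔ (w = a ∨ w = b) := by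
  by_cases h : b = a <;> simp [h] <;> tauto

theorem pvGateIns_nodup (d : PySem.Dict String (String × String × String)) (c : String) :
    (pvGateIns d c).Nodup := by
  unfold pvGateIns
  split
  · apply List.Nodup.filter
    rename_i v _
    by_cases h : v.2.2 = v.2.1 <;> simp [h]
    exact fun hh => h hh.symm
  · simp

theorem pvMemGateIns (d : PySem.Dict String (String × String × String)) (hnd : d.keys.Nodup)
    (p : String × (String × String × String)) (hp : p ∈ d.items) (w : String) :
    w ∈ pvGateIns d p.1 ↔ ((w = p.2.2.1 ∨ w = p.2.2.2) ∧ d.contains w = true) := by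
  have hg : d.get? p.1 = some p.2 := PySem.Dict.get?_of_mem_items d (k := p.1) (v := p.2) hp hnd
  simp only [pvGateIns, hg, List.mem_filter, pvMemRaw]

-- the A-side emptiness test of (inputs - available), for an item of d
theorem pvDiffEmpty (d : PySem.Dict String (String × String × String)) (hnd : d.keys.Nodup)
    (avail : PySem.Set String) (acc : List String)
    (h2 : ∀ x, x ∈ avail ↔
      (((∃ q ∈ d.items, x = q.2.2.1 ∨ x = q.2.2.2) ∧ d.contains x = false) ∨ x ∈ acc))
    (p : String × (String × String × String)) (hp : p ∈ d.items) :
    ((PySem.Set.diff (PySem.Set.ofList [p.2.2.1, p.2.2.2]) avail).isEmpty = true)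
      ↔ (∀ w ∈ pvGateIns d p.1, w ∈ acc) := by
  unfold PySem.Set.diff
  rw [List.isEmpty_iff, List.filter_eq_nil_iff]
  constructor
  · intro h w hw
    rw [pvMemGateIns d hnd p hp] at hw
    obtain ⟨hab, hcont⟩ := hw
    have hmem : w ∈ PySem.Set.ofList [p.2.2.1, p.2.2.2] := by
      rw [PySem.Set.mem_ofList]; simpa using hab
    have := h w hmem
    simp only [Bool.not_eq_true', Bool.not_eq_false] at this
    rw [PySem.Set.contains_iff] at this
    rcases (h2 w).1 this with ⟨_, hc⟩ | hacc
    · rw [hcont] at hc; cases hc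
    · exact hacc
  · intro h x hx
    rw [PySem.Set.mem_ofList] at hx
    simp only [List.mem_cons, List.mem_singleton, List.not_mem_nil, or_false] at hx
    simp only [Bool.not_eq_true', Bool.not_eq_false]
    rw [PySem.Set.contains_iff]
    by_cases hc : d.contains x = true
    · have hxg : x ∈ pvGateIns d p.1 := by
        rw [pvMemGateIns d hnd p hp]; exact ⟨hx, hc⟩
      exact (h2 x).2 (Or.inr (h x hxg))
    · exact (h2 x).2 (Or.inl ⟨⟨p, hp, hx⟩, by simpa using hc⟩)

set_option maxHeartbeats 2000000 in

set_option maxHeartbeats 2000000 in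
theorem pvMain (d : PySem.Dict String (String × String × String)) (hnd : d.keys.Nodup)
    (deps : PySem.Dict String (List String))
    (h5 : ∀ w, deps.getD w [] =
      (d.items.filter (fun p => decide (w ∈ pvGateIns d p.1))).map (fun p => p.1))
    (f : Nat) (W : PySem.Dict String (PySem.Set String)) (avail : PySem.Set String)
    (ind : PySem.Dict String Int) (level acc : List String)
    (h1 : W.items = (d.items.filter (fun p => !decide (p.1 ∈ acc))).map
            (fun p => (p.1, PySem.Set.ofList [p.2.2.1, p.2.2.2])))
    (h2 : ∀ x, x ∈ avail ↔
      (((∃ q ∈ d.items, x = q.2.2.1 ∨ x = q.2.2.2) ∧ d.contains x = false) ∨ x ∈ acc))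
    (h3 : ∃ L : List String, L.Nodup ∧
            (∀ c, c ∈ L ↔ (c ∈ d.keys ∧ c ∉ acc ∧ ∀ w ∈ pvGateIns d c, w ∈ acc)) ∧
            level = PySem.List.sorted L (fun x => x) false)
    (h4 : ∀ c ∈ d.keys, c ∉ acc → c ∉ level →
            ind.getD c 0 = (((pvGateIns d c).filter (fun w => !decide (w ∈ acc))).length : Int))
    (h6a : acc.Nodup) (h6b : ∀ c ∈ acc, c ∈ d.keys)
    (h8 : ∀ c ∈ acc, ∀ w ∈ pvGateIns d c, w ∈ acc) :
    pvALoop f W avail acc = pvBLoop f ind deps level acc := by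
  induction f generalizing W avail ind level acc with
  | zero => rfl
  | succ f ih =>
    obtain ⟨L, hLnd, hLmem, hlevel⟩ := h3
    have hlmem : ∀ c, c ∈ level ↔ c ∈ L := by
      intro c
      rw [hlevel]
      exact (PySem.List.sorted_perm L _ false).mem_iff
    have hlevnd : level.Nodup := by
      rw [hlevel]; exact ((PySem.List.sorted_perm L _ false).nodup_iff).2 hLnd
    have hlevacc : ∀ c ∈ level, c ∉ acc := by
      intro c hc; exact ((hLmem c).1 ((hlmem c).1 hc)).2.1
    by_cases hL : L = []
    · -- no gate is ready: B exits its loop; A's filter is empty and A stalls on its fuel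
      have hlevnil : level = [] := by
        subst hL; rw [hlevel]; rfl
      have hBnil : pvBLoop (f + 1) ind deps level acc = acc := by
        rw [pvBLoop, hlevnil]; rfl
      rw [hBnil]
      apply pvAStall
      rw [h1, List.filter_map, List.map_eq_nil_iff, List.filter_eq_nil_iff]
      rintro p hp
      rw [List.mem_filter] at hp
      obtain ⟨hpI, hpacc⟩ := hp
      simp only [Function.comp] at *
      intro hdiff
      have hins : ∀ w ∈ pvGateIns d p.1, w ∈ acc :=
        (pvDiffEmpty d hnd avail acc h2 p hpI).1 hdiff
      have : p.1 ∈ L := (hLmem p.1).2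
        ⟨by simp only [PySem.Dict.keys]; exact List.mem_map_of_mem hpI,
         by simpa using hpacc, hins⟩
      rw [hL] at this
      cases this
    · -- a nonempty level
      -- the combined readiness test, as a predicate on items of d
      have hmemkeys : ∀ c, c ∈ d.keys ↔ ∃ p ∈ d.items, p.1 = c := by
        intro c; simp [PySem.Dict.keys]
      obtain ⟨c0, hc0⟩ := List.exists_mem_of_ne_nil L hL
      have hc0' := (hLmem c0).1 hc0
      set Q : (String × (String × String × String)) → Bool :=
        fun p => !decide (p.1 ∈ acc) && decide (∀ w ∈ pvGateIns d p.1, w ∈ acc) with hQ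
      set NL : List String := (d.items.filter Q).map (fun p => p.1) with hNLdef
      have hNLnd : NL.Nodup := by
        apply List.Nodup.sublist _ hnd
        exact List.Sublist.map _ List.filter_sublist
      have hNLmem : ∀ x, x ∈ NL ↔ x ∈ L := by
        intro x
        rw [hNLdef, List.mem_map, hLmem x]
        constructor
        · rintro ⟨p, hp, rfl⟩
          rw [List.mem_filter] at hp
          obtain ⟨hpI, hQp⟩ := hp
          rw [hQ] at hQp
          simp only [Bool.and_eq_true, Bool.not_eq_true', decide_eq_false_iff_not,
            decide_eq_true_eq] at hQp
          exact ⟨(hmemkeys p.1).2 ⟨p, hpI, rfl⟩, hQp.1, hQp.2⟩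
        · rintro ⟨hk, hacc, hins⟩
          obtain ⟨p, hpI, rfl⟩ := (hmemkeys x).1 hk
          refine ⟨p, ?_, rfl⟩
          rw [List.mem_filter]
          refine ⟨hpI, ?_⟩
          rw [hQ]
          simp only [Bool.and_eq_true, Bool.not_eq_true', decide_eq_false_iff_not,
            decide_eq_true_eq]
          exact ⟨hacc, hins⟩
      have hNLlev : ∀ x, x ∈ NL ↔ x ∈ level := by
        intro x; rw [hNLmem x, hlmem x]
      -- A's newly-available key list is NL
      have hANL : (W.items.filter
          (fun p => (PySem.Set.diff p.2 avail).isEmpty)).map (fun p => p.1) = NL := by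
        rw [h1, List.filter_map, List.map_map]
        rw [List.filter_filter]
        rw [hNLdef]
        refine congrArg₂ List.map rfl ?_
        apply List.filter_congr
        intro p hp
        have hde := pvDiffEmpty d hnd avail acc h2 p hp
        simp only [Function.comp, hQ]
        by_cases hins : ∀ w ∈ pvGateIns d p.1, w ∈ acc
        · rw [hde.2 hins]
          simp [hins, Bool.and_comm]
          exact fun _ => hins
        · have hfalse : (PySem.Set.diff (PySem.Set.ofList [p.2.2.1, p.2.2.2]) avail).isEmpty
              = false := eq_false_of_ne_true (fun h => hins (hde.1 h))
          simp [hfalse, hins]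
      have hofl : PySem.Set.ofList NL = NL := PySem.Set.ofList_eq_self_of_nodup NL hNLnd
      have hsortedNL : PySem.List.sorted NL (fun x => x) false = level := by
        rw [hlevel]
        exact pvSortedCongr NL L hNLnd hLnd hNLmem
      -- A takes its loop body
      have hWne : W.items.isEmpty = false := by
        obtain ⟨p, hpI, hp1⟩ := (hmemkeys c0).1 hc0'.1
        rw [h1]
        rcases hmm : (d.items.filter (fun p => !decide (p.1 ∈ acc))).map
            (fun p => (p.1, PySem.Set.ofList [p.2.2.1, p.2.2.2])) with _ | _
        · exfalso
          rw [List.map_eq_nil_iff, List.filter_eq_nil_iff] at hmm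
          exact hmm p hpI (by simp [hp1, hc0'.2.1])
        · rw [hmm]; rfl
      have hlevne : level.isEmpty = false := by
        have : c0 ∈ level := (hlmem c0).2 hc0
        rcases level with _ | _
        · cases this
        · rfl
      rw [pvALoop, pvBLoop, if_neg (by rw [hWne]; simp), if_neg (by rw [hlevne]; simp)]
      rw [hANL, hofl]
      show pvALoop f (List.foldl (fun w c => w.erase c) W NL) (avail.union NL)
          (acc ++ PySem.List.sorted NL (fun x => x)) =
        pvBLoop f (List.foldl (fun st w => List.foldl pvBDec st (deps.getD w []))
            (ind, ([] : List String)) level).1 deps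
          (PySem.List.sorted (List.foldl (fun st w => List.foldl pvBDec st (deps.getD w []))
            (ind, ([] : List String)) level).2 (fun x => x)) (acc ++ level)
      rw [hsortedNL, ← List.foldl_flatMap]
      set pairs : List String := level.flatMap (fun w => deps.getD w []) with hpairsdef
      set acc' : List String := acc ++ level with hacc'
      -- membership and counting facts for deps and pairs
      have hmemdeps : ∀ w c, c ∈ deps.getD w [] ↔ (c ∈ d.keys ∧ w ∈ pvGateIns d c) := by
        intro w c
        rw [h5 w, List.mem_map]
        constructor
        · rintro ⟨p, hp, rfl⟩
          rw [List.mem_filter] at hp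
          exact ⟨(hmemkeys p.1).2 ⟨p, hp.1, rfl⟩, by simpa using hp.2⟩
        · rintro ⟨hk, hw⟩
          obtain ⟨p, hpI, rfl⟩ := (hmemkeys c).1 hk
          exact ⟨p, List.mem_filter.2 ⟨hpI, by simpa using hw⟩, rfl⟩
      have hdepsnd : ∀ w, (deps.getD w []).Nodup := by
        intro w
        rw [h5 w]
        apply List.Nodup.sublist _ hnd
        exact List.Sublist.map _ List.filter_sublist
      have hmempairs : ∀ c, c ∈ pairs ↔ (c ∈ d.keys ∧ ∃ w ∈ level, w ∈ pvGateIns d c) := by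
        intro c
        rw [hpairsdef, List.mem_flatMap]
        constructor
        · rintro ⟨w, hw, hc⟩
          rw [hmemdeps w c] at hc
          exact ⟨hc.1, w, hw, hc.2⟩
        · rintro ⟨hk, w, hw, hwc⟩
          exact ⟨w, hw, (hmemdeps w c).2 ⟨hk, hwc⟩⟩
      have hpairsNotAcc : ∀ c ∈ pairs, c ∉ acc ∧ c ∉ level := by
        intro c hc
        obtain ⟨hk, w, hwlev, hwins⟩ := (hmempairs c).1 hc
        constructor
        · intro hmem
          exact (hlevacc w hwlev) (h8 c hmem w hwins)
        · intro hmem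
          exact (hlevacc w hwlev) (((hLmem c).1 ((hlmem c).1 hmem)).2.2 w hwins)
      have hcountpairs : ∀ c, c ∈ d.keys →
          pairs.count c = level.countP (fun w => decide (w ∈ pvGateIns d c)) := by
        intro c hck
        rw [hpairsdef, List.count_flatMap]
        have hmapc : (level.map (List.count c ∘ fun w => deps.getD w [])).sum
            = (level.map (fun w => if decide (w ∈ pvGateIns d c) then 1 else 0)).sum := by
          congr 1
          apply List.map_congr_left
          intro w hw
          simp only [Function.comp]
          rw [pvCount_nodup _ (hdepsnd w) c]
          by_cases hwc : w ∈ pvGateIns d c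
          · rw [if_pos ((hmemdeps w c).2 ⟨hck, hwc⟩), if_pos (by simpa using hwc)]
          · rw [if_neg (fun hmm => hwc ((hmemdeps w c).1 hmm).2), if_neg (by simpa using hwc)]
        rw [hmapc]
        exact PySem.List.sum_map_ite_one_zero_nat _ level
      have hsymmc : ∀ c, level.countP (fun w => decide (w ∈ pvGateIns d c))
          = ((pvGateIns d c).filter (fun w => decide (w ∈ level))).length := by
        intro c
        rw [List.countP_eq_length_filter]
        exact pvInterLen level (pvGateIns d c) hlevnd (pvGateIns_nodup d c)
      have hindpairs : ∀ c ∈ pairs, ind.getD c 0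
          = (((pvGateIns d c).filter (fun w => !decide (w ∈ acc))).length : Int) := by
        intro c hc
        obtain ⟨hnacc, hnlev⟩ := hpairsNotAcc c hc
        exact h4 c ((hmempairs c).1 hc).1 hnacc hnlev
      -- the level-filter is a sub-filter of the acc-complement filter on gate inputs
      have hsublen : ∀ c, ((pvGateIns d c).filter (fun w => decide (w ∈ level))).length
          ≤ ((pvGateIns d c).filter (fun w => !decide (w ∈ acc))).length := by
        intro c
        rw [← List.countP_eq_length_filter, ← List.countP_eq_length_filter]
        apply List.countP_mono_left
        intro w _ hw
        simp only [decide_eq_true_eq] at hw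
        simp only [Bool.not_eq_true', decide_eq_false_iff_not]
        exact hlevacc w hw
      have hge : ∀ c ∈ pairs, (pairs.count c : Int) ≤ ind.getD c 0 := by
        intro c hc
        rw [hindpairs c hc, hcountpairs c ((hmempairs c).1 hc).1, hsymmc c]
        exact_mod_cast hsublen c
      obtain ⟨hD1, hD2, hD3⟩ := pvDecFold pairs ind [] hge
      -- countP split on the inputs of a gate outside acc ++ level
      have hsplit : ∀ c, (pvGateIns d c).countP (fun w => !decide (w ∈ acc))
          = (pvGateIns d c).countP (fun w => decide (w ∈ level))
            + (pvGateIns d c).countP (fun w => !decide (w ∈ acc') ) := by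
        intro c
        rw [pvCountP_split (pvGateIns d c) (fun w => !decide (w ∈ acc))
          (fun w => decide (w ∈ level))]
        congr 1
        · apply List.countP_congr
          intro w _
          by_cases hw : w ∈ level
          · simp [hw, hlevacc w hw]
          · simp [hw]
        · apply List.countP_congr
          intro w _
          rw [hacc']
          by_cases hw1 : w ∈ acc <;> by_cases hw2 : w ∈ level <;>
            simp [hw1, hw2, hlevacc w]
      -- characterize the next level
      have hnextchar : ∀ c, c ∈ (pairs.foldl pvBDec (ind, ([] : List String))).2
          ↔ (c ∈ d.keys ∧ c ∉ acc' ∧ ∀ w ∈ pvGateIns d c, w ∈ acc') := by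
        intro c
        rw [hD2 c]
        simp only [List.not_mem_nil, false_or]
        constructor
        · rintro ⟨hcp, heq⟩
          have hck := ((hmempairs c).1 hcp).1
          obtain ⟨hnacc, hnlev⟩ := hpairsNotAcc c hcp
          refine ⟨hck, by simp [hacc', hnacc, hnlev], ?_⟩
          rw [hindpairs c hcp, hcountpairs c hck, hsymmc c] at heq
          have heqn : ((pvGateIns d c).filter (fun w => !decide (w ∈ acc))).length
              = ((pvGateIns d c).filter (fun w => decide (w ∈ level))).length := by
            exact_mod_cast heq
          rw [← List.countP_eq_length_filter, ← List.countP_eq_length_filter] at heqn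
          have hzero : (pvGateIns d c).countP (fun w => !decide (w ∈ acc')) = 0 := by
            have := hsplit c
            omega
          intro w hw
          by_contra hwn
          have := List.countP_eq_zero.1 hzero w hw
          simp only [Bool.not_eq_true', decide_eq_false_iff_not, Decidable.not_not] at this
          exact hwn this
        · rintro ⟨hck, hnacc', hins⟩
          have hnacc : c ∉ acc := fun h => hnacc' (by simp [hacc', h])
          have hnlev : c ∉ level := fun h => hnacc' (by simp [hacc', h])
          have hwit : ∃ w ∈ level, w ∈ pvGateIns d c := by
            by_contra hno
            push_neg at hno
            have hsub : ∀ w ∈ pvGateIns d c, w ∈ acc := by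
              intro w hw
              rcases List.mem_append.1 (hins w hw) with h | h
              · exact h
              · exact absurd hw (fun _ => (hno w h) hw)
            exact hnlev ((hlmem c).2 ((hLmem c).2 ⟨hck, hnacc, hsub⟩))
          have hcp : c ∈ pairs := (hmempairs c).2 ⟨hck, hwit⟩
          refine ⟨hcp, ?_⟩
          rw [hindpairs c hcp, hcountpairs c hck, hsymmc c]
          have : ((pvGateIns d c).filter (fun w => !decide (w ∈ acc))).length
              = ((pvGateIns d c).filter (fun w => decide (w ∈ level))).length := by
            rw [← List.countP_eq_length_filter, ← List.countP_eq_length_filter]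
            apply List.countP_congr
            intro w hw
            by_cases hwl : w ∈ level
            · simp [hwl, hlevacc w hwl]
            · rcases List.mem_append.1 (hins w hw) with h | h
              · simp [hwl, h]
              · exact absurd h hwl
          exact_mod_cast this
      have hnextnd : (pairs.foldl pvBDec (ind, ([] : List String))).2.Nodup :=
        hD3 (by simp) (by simp)
      -- apply the induction hypothesis at the new joint state
      apply ih
      · -- h1
        rw [pvEraseFold, h1, List.filter_map, List.filter_filter]
        congr 1
        apply List.filter_congr
        intro p _
        by_cases hp1 : p.1 ∈ acc <;> by_cases hp2 : p.1 ∈ level <;>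
          simp [hp1, hp2, hacc', hNLlev p.1]
      · -- h2
        intro x
        have hx : x ∈ PySem.Set.union avail NL ↔ (x ∈ avail ∨ x ∈ NL) :=
          PySem.Set.mem_update avail NL x
        rw [hx, h2 x, hNLlev x, hacc']
        simp only [List.mem_append]
        constructor
        · rintro ((h | h) | h)
          · exact Or.inl h
          · exact Or.inr (Or.inl h)
          · exact Or.inr (Or.inr h)
        · rintro (h | (h | h))
          · exact Or.inl (Or.inl h)
          · exact Or.inl (Or.inr h)
          · exact Or.inr h
      · -- h3
        exact ⟨(pairs.foldl pvBDec (ind, ([] : List String))).2, hnextnd, hnextchar, rfl⟩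
      · -- h4
        intro c hck hcnacc' hcnlev'
        rw [hD1 c]
        have hnacc : c ∉ acc := fun h => hcnacc' (by simp [hacc', h])
        have hnlev : c ∉ level := fun h => hcnacc' (by simp [hacc', h])
        rw [h4 c hck hnacc hnlev, hcountpairs c hck, hsymmc c]
        have := hsplit c
        rw [List.countP_eq_length_filter, List.countP_eq_length_filter,
          List.countP_eq_length_filter] at this
        push_cast
        omega
      · -- h6a
        rw [hacc']
        exact List.Nodup.append h6a hlevnd (fun x hx hx2 => (hlevacc x hx2) hx)
      · -- h6b
        intro c hc
        rcases List.mem_append.1 hc with h | h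
        · exact h6b c h
        · exact ((hLmem c).1 ((hlmem c).1 h)).1
      · -- h8
        intro c hc w hw
        rw [hacc']
        rcases List.mem_append.1 hc with h | h
        · exact List.mem_append.2 (Or.inl (h8 c h w hw))
        · exact List.mem_append.2 (Or.inl (((hLmem c).1 ((hlmem c).1 h)).2.2 w hw))

-- pvInsB agrees with pvGateIns on items of d
theorem pvInsB_eq (d : PySem.Dict String (String × String × String)) (hnd : d.keys.Nodup)
    (p : String × (String × String × String)) (hp : p ∈ d.items) :
    pvInsB d p = pvGateIns d p.1 := by
  have hg : d.get? p.1 = some p.2 :=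
    PySem.Dict.get?_of_mem_items d (k := p.1) (v := p.2) hp hnd
  simp only [pvInsB, pvGateIns, hg]

theorem pvFilterBeq (l : List String) (h : l.Nodup) (w : String) :
    l.filter (fun x => x == w) = if w ∈ l then [w] else [] := by
  split
  · rw [List.filter_beq, List.count_eq_one_of_mem h (by assumption)]; rfl
  · rw [List.filter_beq, List.count_eq_zero_of_not_mem (by assumption)]; rfl

theorem pvInsB_nodup (d : PySem.Dict String (String × String × String))
    (p : String × (String × String × String)) : (pvInsB d p).Nodup := by
  unfold pvInsB
  apply List.Nodup.filter
  by_cases h : p.2.2.2 = p.2.2.1 <;> simp [h]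
  exact fun hh => h hh.symm

theorem pvAExplicit (gates : List (String × String × String × String)) :
    sort_gates gates = (pvALoop ((PySem.Dict.ofList gates).items.length + 1)
      (PySem.Dict.ofList ((PySem.Dict.ofList gates).items.map
        (fun p => (p.1, PySem.Set.ofList [p.2.2.1, p.2.2.2]))))
      (PySem.Set.ofList (((PySem.Dict.ofList ((PySem.Dict.ofList gates).items.map
          (fun p => (p.1, PySem.Set.ofList [p.2.2.1, p.2.2.2])))).values.flatMap
            (fun s => s)).filter
        (fun i => !((PySem.Dict.ofList ((PySem.Dict.ofList gates).items.map
          (fun p => (p.1, PySem.Set.ofList [p.2.2.1, p.2.2.2])))).contains i))))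
      []).map (fun w => (w, (PySem.Dict.ofList gates).getD w ("", "", ""))) := rfl

theorem pvBExplicit (gates : List (String × String × String × String)) :
    sort_gates_alt gates = (pvBLoop ((PySem.Dict.ofList gates).items.length + 1)
      ((PySem.Dict.ofList gates).items.foldl
        (fun (st : PySem.Dict String Int × PySem.Dict String (List String)) p =>
          (pvBIndStep (PySem.Dict.ofList gates) st.1 p,
           pvBDepsStep (PySem.Dict.ofList gates) st.2 p))
        (PySem.Dict.empty, PySem.Dict.empty)).1
      ((PySem.Dict.ofList gates).items.foldl
        (fun (st : PySem.Dict String Int × PySem.Dict String (List String)) p =>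
          (pvBIndStep (PySem.Dict.ofList gates) st.1 p,
           pvBDepsStep (PySem.Dict.ofList gates) st.2 p))
        (PySem.Dict.empty, PySem.Dict.empty)).2
      (PySem.List.sorted ((((PySem.Dict.ofList gates).items.foldl
        (fun (st : PySem.Dict String Int × PySem.Dict String (List String)) p =>
          (pvBIndStep (PySem.Dict.ofList gates) st.1 p,
           pvBDepsStep (PySem.Dict.ofList gates) st.2 p))
        (PySem.Dict.empty, PySem.Dict.empty)).1).keys.filter
          (fun c => ((PySem.Dict.ofList gates).items.foldl
            (fun (st : PySem.Dict String Int × PySem.Dict String (List String)) p =>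
              (pvBIndStep (PySem.Dict.ofList gates) st.1 p,
               pvBDepsStep (PySem.Dict.ofList gates) st.2 p))
            (PySem.Dict.empty, PySem.Dict.empty)).1.getD c 0 == 0))
        (fun x => x) false)
      []).map (fun c => (c, (PySem.Dict.ofList gates).getD c ("", "", ""))) := rfl

set_option maxHeartbeats 2000000 in
theorem pvPortsEq (gates : List (String × String × String × String)) :
    sort_gates gates = sort_gates_alt gates := by
  rw [pvAExplicit gates, pvBExplicit gates]
  set d : PySem.Dict String (String × String × String) := PySem.Dict.ofList gates with hd
  have hnd : d.keys.Nodup := PySem.Dict.nodup_keys_ofList gates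
  have hkeys : d.keys = d.items.map (fun p => p.1) := rfl
  have hmemkeys : ∀ c, c ∈ d.keys ↔ ∃ p ∈ d.items, p.1 = c := by
    intro c; simp [PySem.Dict.keys]
  -- ===== the A-side initial state =====
  set g : (String × (String × String × String)) → (String × PySem.Set String) :=
    fun p => (p.1, PySem.Set.ofList [p.2.2.1, p.2.2.2]) with hg
  have hWitems : (PySem.Dict.ofList (d.items.map g)).items = d.items.map g := by
    show (PySem.Dict.empty.update (d.items.map g)).items = d.items.map g
    unfold PySem.Dict.update
    rw [PySem.Dict.items_foldl_insert_fresh (d.items.map g) (fun a => a.1) (fun a => a.2)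
      PySem.Dict.empty (fun a _ => PySem.Dict.contains_empty a.1) ?nd]
    case nd =>
      rw [List.map_map]
      exact hnd
    show ([] : List (String × PySem.Set String))
        ++ List.map (fun a => (a.1, a.2)) (List.map g d.items) = List.map g d.items
    rw [List.nil_append, List.map_map]
    exact List.map_congr_left (fun a _ => rfl)
  have hWkeys : (PySem.Dict.ofList (d.items.map g)).keys = d.keys := by
    show (PySem.Dict.ofList (d.items.map g)).items.map (fun p => p.1) = d.keys
    rw [hWitems, List.map_map, hkeys]
    rfl
  have hWcont : ∀ x, (PySem.Dict.ofList (d.items.map g)).contains x = d.contains x := by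
    intro x
    rw [PySem.Dict.contains_eq_decide_mem_keys, PySem.Dict.contains_eq_decide_mem_keys, hWkeys]
  have h1i : (PySem.Dict.ofList (d.items.map g)).items
      = (d.items.filter (fun p => !decide (p.1 ∈ ([] : List String)))).map g := by
    rw [hWitems]
    congr 1
    exact (List.filter_eq_self.2 (fun a _ => by simp)).symm
  have h2i : ∀ x, x ∈ PySem.Set.ofList
      (((PySem.Dict.ofList (d.items.map g)).values.flatMap (fun s => s)).filter
        (fun i => !((PySem.Dict.ofList (d.items.map g)).contains i))) ↔
      (((∃ q ∈ d.items, x = q.2.2.1 ∨ x = q.2.2.2) ∧ d.contains x = false)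
        ∨ x ∈ ([] : List String)) := by
    intro x
    rw [PySem.Set.mem_ofList, List.mem_filter]
    have hv : (PySem.Dict.ofList (d.items.map g)).values
        = d.items.map (fun p => PySem.Set.ofList [p.2.2.1, p.2.2.2]) := by
      show (PySem.Dict.ofList (d.items.map g)).items.map (fun p => p.2) = _
      rw [hWitems, List.map_map]
      rfl
    rw [hv, List.mem_flatMap]
    constructor
    · rintro ⟨⟨s, hs, hxs⟩, hc⟩
      rw [List.mem_map] at hs
      obtain ⟨p, hpI, rfl⟩ := hs
      rw [PySem.Set.mem_ofList] at hxs
      simp only [List.mem_cons, List.not_mem_nil, or_false] at hxs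
      rw [hWcont x] at hc
      refine Or.inl ⟨⟨p, hpI, hxs⟩, by simpa using hc⟩
    · rintro (⟨⟨q, hqI, hxq⟩, hc⟩ | h)
      · refine ⟨⟨PySem.Set.ofList [q.2.2.1, q.2.2.2], List.mem_map_of_mem hqI, ?_⟩, ?_⟩
        · rw [PySem.Set.mem_ofList]; simpa using hxq
        · rw [hWcont x, hc]; rfl
      · cases h
  -- ===== the B-side initial state =====
  rw [PySem.List.foldl_prod_mk (pvBIndStep d) (pvBDepsStep d) d.items
    PySem.Dict.empty PySem.Dict.empty]
  set ind0 : PySem.Dict String Int := d.items.foldl (pvBIndStep d) PySem.Dict.empty with hind0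
  set deps0 : PySem.Dict String (List String) :=
    d.items.foldl (pvBDepsStep d) PySem.Dict.empty with hdeps0
  have hindItems : ind0.items = d.items.map (fun p => (p.1, ((pvInsB d p).length : Int))) := by
    rw [hind0]
    unfold pvBIndStep
    rw [PySem.Dict.items_foldl_insert_fresh d.items (fun a => a.1)
      (fun a => ((pvInsB d a).length : Int))
      PySem.Dict.empty (fun a _ => PySem.Dict.contains_empty a.1) hnd]
    rfl
  have hindKeys : ind0.keys = d.keys := by
    show ind0.items.map (fun p => p.1) = d.keys
    rw [hindItems, List.map_map, hkeys]
    rfl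
  have hindKeysNd : ind0.keys.Nodup := by rw [hindKeys]; exact hnd
  have hindGetD : ∀ p ∈ d.items, ind0.getD p.1 0 = ((pvGateIns d p.1).length : Int) := by
    intro p hp
    have hmem : (p.1, ((pvInsB d p).length : Int)) ∈ ind0.items := by
      rw [hindItems]
      exact List.mem_map_of_mem hp
    rw [PySem.Dict.getD_of_mem_items ind0 (k := p.1) hmem hindKeysNd, pvInsB_eq d hnd p hp]
  have h4i : ∀ c ∈ d.keys, c ∉ ([] : List String) →
      c ∉ PySem.List.sorted (ind0.keys.filter (fun c => ind0.getD c 0 == 0)) (fun x => x) false →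
      ind0.getD c 0
        = (((pvGateIns d c).filter (fun w => !decide (w ∈ ([] : List String)))).length : Int) := by
    intro c hck _ _
    obtain ⟨p, hpI, rfl⟩ := (hmemkeys c).1 hck
    rw [hindGetD p hpI]
    congr 2
    exact (List.filter_eq_self.2 (fun a _ => by simp)).symm
  have h3i : ∃ L : List String, L.Nodup ∧
      (∀ c, c ∈ L ↔ (c ∈ d.keys ∧ c ∉ ([] : List String) ∧
        ∀ w ∈ pvGateIns d c, w ∈ ([] : List String))) ∧
      PySem.List.sorted (ind0.keys.filter (fun c => ind0.getD c 0 == 0)) (fun x => x) false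
        = PySem.List.sorted L (fun x => x) false := by
    refine ⟨ind0.keys.filter (fun c => ind0.getD c 0 == 0), hindKeysNd.filter _, ?_, rfl⟩
    intro c
    rw [List.mem_filter, hindKeys]
    constructor
    · rintro ⟨hck, hz⟩
      obtain ⟨p, hpI, rfl⟩ := (hmemkeys c).1 hck
      rw [hindGetD p hpI] at hz
      simp only [beq_iff_eq, Int.natCast_eq_zero, List.length_eq_zero_iff] at hz
      refine ⟨hck, by simp, ?_⟩
      rw [hz]
      simp
    · rintro ⟨hck, _, hins⟩
      obtain ⟨p, hpI, rfl⟩ := (hmemkeys c).1 hck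
      have hnil : pvGateIns d p.1 = [] := by
        rw [List.eq_nil_iff_forall_not_mem]
        intro w hw
        exact (List.not_mem_nil (a := w)) (hins w hw)
      refine ⟨hck, ?_⟩
      rw [hindGetD p hpI, hnil]
      rfl
  have h5i : ∀ w, deps0.getD w [] =
      (d.items.filter (fun p => decide (w ∈ pvGateIns d p.1))).map (fun p => p.1) := by
    intro w
    have e1 : ∀ (dp : PySem.Dict String (List String)) p, pvBDepsStep d dp p
        = ((pvInsB d p).map (fun w' => (w', p.1))).foldl
            (fun dp q => dp.modify q.1 [] (fun l => l ++ [q.2])) dp := by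
      intro dp p
      unfold pvBDepsStep
      rw [List.foldl_map]
    have e2 : deps0 = (d.items.flatMap (fun p => (pvInsB d p).map (fun w' => (w', p.1)))).foldl
        (fun dp q => dp.modify q.1 [] (fun l => l ++ [q.2])) PySem.Dict.empty := by
      rw [hdeps0, List.foldl_flatMap]
      congr 1
      funext dp p
      exact e1 dp p
    rw [e2, PySem.Dict.getD_foldl_modify_append]
    show (((d.items.flatMap (fun p => (pvInsB d p).map (fun w' => (w', p.1)))).filter
        (fun q => q.1 == w)).map (fun q => q.2)) = _
    rw [List.filter_flatMap, List.map_flatMap]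
    have e3 : ∀ p ∈ d.items,
        (((pvInsB d p).map (fun w' => (w', p.1))).filter (fun q => q.1 == w)).map (fun q => q.2)
          = if decide (w ∈ pvGateIns d p.1) then [p.1] else [] := by
      intro p hp
      rw [List.filter_map]
      have : ((pvInsB d p).filter ((fun (q : String × String) => q.1 == w) ∘
          (fun w' => (w', p.1)))) = (pvInsB d p).filter (fun x => x == w) := rfl
      rw [this, pvFilterBeq (pvInsB d p) (pvInsB_nodup d p) w, pvInsB_eq d hnd p hp]
      by_cases hw : w ∈ pvGateIns d p.1
      · rw [if_pos hw, if_pos (by simpa using hw)]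
        rfl
      · rw [if_neg hw, if_neg (by simpa using hw)]
        rfl
    have e4 : d.items.flatMap (fun p =>
          (((pvInsB d p).map (fun w' => (w', p.1))).filter (fun q => q.1 == w)).map
            (fun q => q.2))
        = d.items.flatMap (fun p => if decide (w ∈ pvGateIns d p.1) then [p.1] else []) :=
      List.flatMap_congr e3
    rw [e4]
    exact pvFlatMapIf d.items _ _
  -- ===== put it together =====
  exact congrArg (List.map (fun w => (w, d.getD w ("", "", ""))))
    (pvMain d hnd deps0 h5i (d.items.length + 1) _ _ ind0 _ [] h1i h2i h3i h4i
      List.nodup_nil (by intro c hc; cases hc) (by intro c hc; cases hc))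

-- ===== VERDICT (by name: the statement is the Claim_ definition above) =====
theorem sort_gates_spec : Claim_equal_sort_gates := by
  intro gates _
  exact pvPortsEq gates
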